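-- pv_equiv track=rewrite | github.com/aehrc/real-time-fhir | api/bundler.py | categorize_references_ids
-- ===== SOURCE A (Python) =====
-- def categorize_references_ids(references):
--     """
--     Categorize_references categorizes reference ids into their respective resource types
--
--     :param references: List storing a resource's references
--     :return: Dict storing (resource type, [resource ids]) as key-value pair
--     """
--     # Get resource types and reference ids
--     rtypes = [
--         item.split("?")[0] if "?" in item else item.split("/")[0]
--         for item in references
--     ]
--     reference_ids = [
--         item.split("|")[1] if "?" in item else item.split("/")[1]
--         for item in references
--     ]
--
--     # Build reference dict from above lists
--     reference_dict = {}
--     for i in range(len(rtypes)):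
--         if rtypes[i] in reference_dict:
--             reference_dict[rtypes[i]].append(reference_ids[i])
--         else:
--             reference_dict[rtypes[i]] = [reference_ids[i]]
--
--     return reference_dict
-- ===== SOURCE B (Python) =====
-- def categorize_references_ids(references):
--     """Group by resource type via key dedup + per-key filter (no incremental dict build)."""
--     pairs = []
--     for item in references:
--         if "?" in item:
--             pairs.append((item.split("?")[0], item.split("|")[1]))
--         else:
--             pairs.append((item.split("/")[0], item.split("/")[1]))
--     keys = []
--     for k, _ in pairs:
--         if k not in keys:
--             keys.append(k)
--     return {k: [v for k2, v in pairs if k2 == k] for k in keys}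
-- ===== Notes on version B (the rewrite author's own statement) =====
-- stated objective: alternative
-- what changed: Instead of A's incremental dict grouping (insert-or-append per index over two comprehension lists), B splits each reference into a (type, id) pair, computes the ordered list of distinct types, and builds the result with one filter scan per distinct type (a dedup-keys-then-filter group-by).
import Mathlib
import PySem

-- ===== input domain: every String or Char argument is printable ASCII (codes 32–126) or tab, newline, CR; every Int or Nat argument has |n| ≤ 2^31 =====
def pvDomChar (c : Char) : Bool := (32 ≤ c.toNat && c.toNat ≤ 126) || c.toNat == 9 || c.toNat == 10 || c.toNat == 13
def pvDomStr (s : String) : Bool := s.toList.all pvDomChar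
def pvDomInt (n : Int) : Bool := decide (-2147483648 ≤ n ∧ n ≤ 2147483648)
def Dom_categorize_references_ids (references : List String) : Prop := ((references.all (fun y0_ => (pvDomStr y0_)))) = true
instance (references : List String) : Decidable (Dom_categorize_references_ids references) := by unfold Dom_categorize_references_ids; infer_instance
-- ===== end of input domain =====

-- B replaces A's incremental dict grouping by a dedup-keys-then-filter group-by (objective: alternative).

-- ===== PORT A =====
-- item.split(sep) for a nonempty literal sep: PySem.Str.split? is some there, .getD [] is never taken
def categorize_references_ids (references : List String) : List (String × List String) :=
  let rtypes := references.map (fun item =>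
    if PySem.Str.isIn "?" item then
      PySem.List.pyGetD ((PySem.Str.split? item "?").getD []) 0 ""
    else
      PySem.List.pyGetD ((PySem.Str.split? item "/").getD []) 0 "")
  let reference_ids := references.map (fun item =>
    if PySem.Str.isIn "?" item then
      PySem.List.pyGetD ((PySem.Str.split? item "|").getD []) 1 ""
    else
      PySem.List.pyGetD ((PySem.Str.split? item "/").getD []) 1 "")
  let reference_dict := (PySem.List.pyRange 0 (PySem.List.len rtypes)).foldl
    (fun acc i =>
      if acc.contains (PySem.List.pyGetD rtypes i "") then
        acc.insert (PySem.List.pyGetD rtypes i "")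
          (acc.getD (PySem.List.pyGetD rtypes i "") [] ++ [PySem.List.pyGetD reference_ids i ""])
      else
        acc.insert (PySem.List.pyGetD rtypes i "") [PySem.List.pyGetD reference_ids i ""])
    PySem.Dict.empty
  reference_dict.items

-- ===== PORT B =====
-- pairs loop = foldl appending one pair; keys loop = PySem.Set.add (membership-checked append);
-- the dict comprehension over distinct keys = map over keys with a filter scan per key
def categorize_references_ids_alt (references : List String) : List (String × List String) :=
  let pairs : List (String × String) := references.foldl
    (fun acc item =>
      if PySem.Str.isIn "?" item then
        acc ++ [(PySem.List.pyGetD ((PySem.Str.split? item "?").getD []) 0 "",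
                 PySem.List.pyGetD ((PySem.Str.split? item "|").getD []) 1 "")]
      else
        acc ++ [(PySem.List.pyGetD ((PySem.Str.split? item "/").getD []) 0 "",
                 PySem.List.pyGetD ((PySem.Str.split? item "/").getD []) 1 "")]) []
  let keys : PySem.Set String := pairs.foldl (fun ks p => PySem.Set.add ks p.1) []
  keys.map (fun k => (k, (pairs.filter (fun p => p.1 == k)).map (·.2)))

-- ===== PRECONDITION & SPEC =====
-- Pre_ excludes exactly the inputs on which the Python A raises IndexError: an item whose id split
-- has no second field ('?' item without '|', or an item with neither '?' nor '/').
def Pre_categorize_references_ids (references : List String) : Prop :=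
  ∀ item ∈ references,
    (if PySem.Str.isIn "?" item then PySem.Str.isIn "|" item else PySem.Str.isIn "/" item) = true
instance (references : List String) : Decidable (Pre_categorize_references_ids references) := by
  unfold Pre_categorize_references_ids; infer_instance

def pvWitness_categorize_references_ids : List String :=
  ["Patient/1", "Observation?code=foo|bar", "Patient/2"]

def Spec_categorize_references_ids (references : List String) (out : List (String × List String)) : Prop := out = categorize_references_ids_alt references
instance (references : List String) (out : List (String × List String)) : Decidable (Spec_categorize_references_ids references out) := by unfold Spec_categorize_references_ids; infer_instance

-- ===== CLAIM (what is proved, stated in full; the proofs are below) =====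
def Claim_equal_categorize_references_ids : Prop := ∀ (references : List String), Dom_categorize_references_ids references → Pre_categorize_references_ids references → Spec_categorize_references_ids references (categorize_references_ids references)

-- ===== LEMMAS AND PROOFS =====

-- proof-side names: the per-item key/id both programs compute
def pvKey (item : String) : String :=
  if PySem.Str.isIn "?" item then
    PySem.List.pyGetD ((PySem.Str.split? item "?").getD []) 0 ""
  else
    PySem.List.pyGetD ((PySem.Str.split? item "/").getD []) 0 ""

def pvId (item : String) : String :=
  if PySem.Str.isIn "?" item then
    PySem.List.pyGetD ((PySem.Str.split? item "|").getD []) 1 ""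
  else
    PySem.List.pyGetD ((PySem.Str.split? item "/").getD []) 1 ""

def pvStepP (d : PySem.Dict String (List String)) (p : String × String) :
    PySem.Dict String (List String) :=
  if d.contains p.1 then d.insert p.1 (d.getD p.1 [] ++ [p.2]) else d.insert p.1 [p.2]

-- A's insert-or-append step = d.modify k [] (· ++ [v])
lemma pvStep_eq (d : PySem.Dict String (List String)) (k v : String) :
    pvStepP d (k, v) = d.modify k [] (· ++ [v]) := by
  unfold pvStepP
  by_cases h : d.contains k = true
  · simp [PySem.Dict.modify, h]
  · simp only [Bool.not_eq_true] at h
    simp [PySem.Dict.modify, h, PySem.Dict.getD_of_not_contains d [] h]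

-- A's index loop over the two comprehension lists = one fold over the references
lemma pvFoldA_eq (references : List String) :
    ((PySem.List.pyRange 0 (PySem.List.len (references.map pvKey))).foldl
      (fun acc i =>
        if acc.contains (PySem.List.pyGetD (references.map pvKey) i "") then
          acc.insert (PySem.List.pyGetD (references.map pvKey) i "")
            (acc.getD (PySem.List.pyGetD (references.map pvKey) i "") []
              ++ [PySem.List.pyGetD (references.map pvId) i ""])
        else
          acc.insert (PySem.List.pyGetD (references.map pvKey) i "")
            [PySem.List.pyGetD (references.map pvId) i ""])
      PySem.Dict.empty)
    = references.foldl (fun d item => pvStepP d (pvKey item, pvId item)) PySem.Dict.empty := by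
  have hlen : PySem.List.len (references.map pvKey)
      = PySem.List.len (references.map (fun it => (pvKey it, pvId it))) := by
    simp [PySem.List.len_eq]
  rw [hlen]
  rw [PySem.List.foldl_congr_mem _ _
    (fun acc j => pvStepP acc
      (PySem.List.pyGetD (references.map (fun it => (pvKey it, pvId it))) j ("", "")))
    PySem.Dict.empty ?_]
  · rw [PySem.List.foldl_pyRange_pyGetD _ _ _ _ (le_refl 0)]
    simp [List.foldl_map]
  · intro acc j hj
    rw [PySem.List.mem_pyRange_one] at hj
    obtain ⟨n, rfl⟩ := Int.eq_ofNat_of_zero_le hj.1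
    have hn : n < references.length := by
      have := hj.2
      simp only [PySem.List.len_eq, List.length_map] at this
      exact_mod_cast this
    simp [pvStepP, List.getD_eq_getElem?_getD, hn]

-- B's pairs loop builds exactly the mapped (key, id) list
lemma pvPairs_eq (references : List String) :
    references.foldl
      (fun acc item =>
        if PySem.Str.isIn "?" item then
          acc ++ [(PySem.List.pyGetD ((PySem.Str.split? item "?").getD []) 0 "",
                   PySem.List.pyGetD ((PySem.Str.split? item "|").getD []) 1 "")]
        else
          acc ++ [(PySem.List.pyGetD ((PySem.Str.split? item "/").getD []) 0 "",
                   PySem.List.pyGetD ((PySem.Str.split? item "/").getD []) 1 "")])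
      []
    = references.map (fun it => (pvKey it, pvId it)) := by
  have h : ∀ (acc : List (String × String)),
      references.foldl
        (fun acc item =>
          if PySem.Str.isIn "?" item then
            acc ++ [(PySem.List.pyGetD ((PySem.Str.split? item "?").getD []) 0 "",
                     PySem.List.pyGetD ((PySem.Str.split? item "|").getD []) 1 "")]
          else
            acc ++ [(PySem.List.pyGetD ((PySem.Str.split? item "/").getD []) 0 "",
                     PySem.List.pyGetD ((PySem.Str.split? item "/").getD []) 1 "")])
        acc
      = acc ++ references.map (fun it => (pvKey it, pvId it)) := by
    induction references with
    | nil => intro acc; simp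
    | cons x xs ih =>
      intro acc
      have hx : (if PySem.Str.isIn "?" x = true then
            acc ++ [(PySem.List.pyGetD ((PySem.Str.split? x "?").getD []) 0 "",
                     PySem.List.pyGetD ((PySem.Str.split? x "|").getD []) 1 "")]
          else
            acc ++ [(PySem.List.pyGetD ((PySem.Str.split? x "/").getD []) 0 "",
                     PySem.List.pyGetD ((PySem.Str.split? x "/").getD []) 1 "")])
          = acc ++ [(pvKey x, pvId x)] := by
        unfold pvKey pvId; split_ifs <;> rfl
      rw [List.foldl_cons, hx, ih, List.map_cons]
      simp
  simpa using h []

-- the common mathematical form: A's grouped dict items = dedup-keys + per-key filter over the pair list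
lemma pvMain (references : List String) :
    (references.foldl (fun d item => pvStepP d (pvKey item, pvId item)) PySem.Dict.empty).items
    = ((references.map (fun it => (pvKey it, pvId it))).foldl
          (fun ks p => PySem.Set.add ks p.1) ([] : PySem.Set String)).map
        (fun k => (k, ((references.map (fun it => (pvKey it, pvId it))).filter
            (fun p => p.1 == k)).map (·.2))) := by
  have hstep : (fun d item => pvStepP d (pvKey item, pvId item))
      = (fun (d : PySem.Dict String (List String)) item =>
          d.modify (pvKey item) [] (· ++ [pvId item])) := by
    funext d item; exact pvStep_eq d (pvKey item) (pvId item)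
  rw [hstep]
  have hfoldmap :
      references.foldl
        (fun (d : PySem.Dict String (List String)) item =>
          d.modify (pvKey item) [] (· ++ [pvId item])) PySem.Dict.empty
      = (references.map (fun it => (pvKey it, pvId it))).foldl
          (fun d p => d.modify p.1 [] (· ++ [p.2])) PySem.Dict.empty := by
    rw [List.foldl_map]
  rw [hfoldmap]
  set l := references.map (fun it => (pvKey it, pvId it)) with hl
  set d := l.foldl (fun d p => d.modify p.1 [] (· ++ [p.2])) PySem.Dict.empty with hd
  have hnd : d.keys.Nodup := by
    rw [hd]
    exact PySem.Dict.nodup_keys_foldl_modify_key l Prod.fst [] (fun _ p => (· ++ [p.2]))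
      PySem.Dict.empty (by simp [PySem.Dict.keys_empty])
  have hkeysA : d.keys = PySem.Set.ofList (l.map Prod.fst) := by
    rw [hd, PySem.Dict.keys_foldl_modify_key]
    simp [PySem.Dict.keys_empty, PySem.Set.update_nil_left]
  have hgetD : ∀ k, d.getD k [] = (l.filter (fun p => p.1 == k)).map (·.2) := by
    intro k
    rw [hd, PySem.Dict.getD_foldl_modify_append]
    simp [PySem.Dict.getD_empty]
  have hkeysB : l.foldl (fun ks p => PySem.Set.add ks p.1) ([] : PySem.Set String)
      = PySem.Set.ofList (l.map Prod.fst) := by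
    rw [← PySem.Set.update_map_eq_foldl_add, PySem.Set.update_nil_left]
  rw [PySem.Dict.items_eq_map_keys d hnd [], hkeysA, hkeysB]
  refine List.map_congr_left ?_
  intro k _
  rw [hgetD k]

-- ===== VERDICT (by name: the statement is the Claim_ definition above) =====
theorem categorize_references_ids_spec : Claim_equal_categorize_references_ids := by
  intro references _ _
  unfold Spec_categorize_references_ids
  show categorize_references_ids references = categorize_references_ids_alt references
  have hA : categorize_references_ids references
      = (references.foldl (fun d item => pvStepP d (pvKey item, pvId item))
          PySem.Dict.empty).items :=
    congrArg PySem.Dict.items (pvFoldA_eq references)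
  have hB := congrArg (fun (l : List (String × String)) =>
      (l.foldl (fun ks p => PySem.Set.add ks p.1) ([] : PySem.Set String)).map
        (fun k => (k, (l.filter (fun p => p.1 == k)).map (·.2)))) (pvPairs_eq references)
  exact hA.trans ((pvMain references).trans hB.symm)
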